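-- pv_equiv track=rewrite | github.com/OnemusCT/temporal-redux | sourcefiles/pcbackend.py | _pc_str_to_ct_ascii
-- ===== SOURCE A (Python) =====
-- _PC_TAG_MAP: dict[str, str] = {
--     'NAME_CRO': '{crono}',
--     'NAME_MAR': '{marle}',
--     'NAME_LUC': '{lucca}',
--     'NAME_ROB': '{robo}',
--     'NAME_FRO': '{frog}',
--     'NAME_AYL': '{ayla}',
--     'NAME_MAG': '{magus}',
--     'NICK_CRO': '{crononick}',
--     'PAGE':     '{page break}',
--     'AUTO_PAGE':'{page break}',
-- }
--
-- _SAFE_CHARS = frozenset(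
--     'ABCDEFGHIJKLMNOPQRSTUVWXYZabcdefghijklmnopqrstuvwxyz'
--     '0123456789'
--     "!?.,:-+%=&()' "
-- )
--
-- def _pc_str_to_ct_ascii(s: str) -> str:
--     """Translate a PC (Steam) message string to CTString-compatible ASCII.
--
--     PC strings use <TAG> syntax and backslash line breaks; CTString uses
--     {keyword} syntax.  Unknown or structural tags are silently dropped.
--     """
--     result: list[str] = []
--     pos = 0
--     while pos < len(s):
--         ch = s[pos]
--         if ch == '<':
--             end = s.find('>', pos)
--             if end == -1:
--                 pos += 1
--                 continue
--             tag = s[pos + 1:end]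
--             if tag.startswith('WAIT'):
--                 # <WAIT>HH</WAIT> — extract the hex delay value between the tags
--                 inner_start = end + 1
--                 close = s.find('</WAIT>', inner_start)
--                 if close != -1:
--                     hex_val = s[inner_start:close].strip()
--                     result.append(f'{{delay {hex_val}}}')
--                     pos = close + len('</WAIT>')
--                 else:
--                     pos = end + 1
--             elif tag in _PC_TAG_MAP:
--                 result.append(_PC_TAG_MAP[tag])
--                 pos = end + 1
--             else:
--                 # Closing tags (</...>) and unknown tags are skipped.
--                 pos = end + 1
--         elif ch == '\\':
--             result.append('{line break}')
--             pos += 1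
--         elif ch in _SAFE_CHARS:
--             result.append(ch)
--             pos += 1
--         else:
--             pos += 1
--     return ''.join(result)
-- ===== SOURCE B (Python) =====
-- _PC_TAG_MAP: dict[str, str] = {
--     'NAME_CRO': '{crono}',
--     'NAME_MAR': '{marle}',
--     'NAME_LUC': '{lucca}',
--     'NAME_ROB': '{robo}',
--     'NAME_FRO': '{frog}',
--     'NAME_AYL': '{ayla}',
--     'NAME_MAG': '{magus}',
--     'NICK_CRO': '{crononick}',
--     'PAGE':     '{page break}',
--     'AUTO_PAGE':'{page break}',
-- }
--
-- _SAFE_CHARS = frozenset(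
--     'ABCDEFGHIJKLMNOPQRSTUVWXYZabcdefghijklmnopqrstuvwxyz'
--     '0123456789'
--     "!?.,:-+%=&()' "
-- )
--
--
-- def _match_token(cs: str):
--     """Match one token at the head of cs; return (emitted text, remaining suffix) or None.
--
--     Alternatives are tried in order: a full <WAIT...>HH</WAIT> construct, a
--     generic <...> tag (mapped or dropped), a backslash line break, a safe char.
--     """
--     # alternative 1: <WAIT...>HH</WAIT>
--     if cs.startswith('<WAIT'):
--         _tag_rest, gt, after_tag = cs[5:].partition('>')
--         if gt:
--             inner, close, after = after_tag.partition('</WAIT>')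
--             if close:
--                 return '{delay ' + inner.strip() + '}', after
--     # alternative 2: a generic <...> tag — translated via the map, or dropped
--     if cs.startswith('<'):
--         tag, gt, after = cs[1:].partition('>')
--         if gt:
--             return _PC_TAG_MAP.get(tag, ''), after
--     # alternative 3: a backslash is a line break
--     if cs.startswith('\\'):
--         return '{line break}', cs[1:]
--     # alternative 4: a safe literal character
--     if cs and cs[0] in _SAFE_CHARS:
--         return cs[0], cs[1:]
--     return None
--
--
-- def _pc_str_to_ct_ascii(s: str) -> str:
--     out = []
--     rest = s
--     while rest:
--         tok = _match_token(rest)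
--         if tok is None:
--             rest = rest[1:]          # unmatched character: silently dropped
--         else:
--             emit, rest = tok
--             out.append(emit)
--     return ''.join(out)
-- ===== Notes on version B (the rewrite author's own statement) =====
-- stated objective: alternative
-- what changed: A scans with an absolute position index and s.find() calls plus slice arithmetic; B is a suffix-consuming tokenizer: a _match_token function tries the four token alternatives (WAIT block, generic tag via str.partition, backslash, safe char) at the head of the remaining suffix and the loop either consumes the matched token or drops one character, with no index arithmetic.
import Mathlib
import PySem

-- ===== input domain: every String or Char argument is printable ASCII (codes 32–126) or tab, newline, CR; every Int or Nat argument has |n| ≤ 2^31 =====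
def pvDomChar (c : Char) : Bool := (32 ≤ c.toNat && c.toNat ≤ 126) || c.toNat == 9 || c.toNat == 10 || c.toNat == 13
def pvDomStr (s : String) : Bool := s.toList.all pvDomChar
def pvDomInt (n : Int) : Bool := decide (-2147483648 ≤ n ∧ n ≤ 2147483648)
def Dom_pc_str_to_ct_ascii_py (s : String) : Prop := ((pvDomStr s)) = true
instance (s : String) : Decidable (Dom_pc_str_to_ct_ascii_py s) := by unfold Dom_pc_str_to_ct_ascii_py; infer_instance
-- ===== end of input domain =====

-- B re-implements the index/find-based scanner as a suffix-consuming tokenizer built on str.partition;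
-- same return value everywhere (objective: alternative decomposition, no speed claim).

-- ===== PORT A =====
-- module constant _PC_TAG_MAP (a dict literal; both programs read it)
def pcTagMap : PySem.Dict (List Char) (List Char) :=
  PySem.Dict.ofList
    [("NAME_CRO".toList, "{crono}".toList),
     ("NAME_MAR".toList, "{marle}".toList),
     ("NAME_LUC".toList, "{lucca}".toList),
     ("NAME_ROB".toList, "{robo}".toList),
     ("NAME_FRO".toList, "{frog}".toList),
     ("NAME_AYL".toList, "{ayla}".toList),
     ("NAME_MAG".toList, "{magus}".toList),
     ("NICK_CRO".toList, "{crononick}".toList),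
     ("PAGE".toList,     "{page break}".toList),
     ("AUTO_PAGE".toList,"{page break}".toList)]

-- module constant _SAFE_CHARS (a frozenset literal; only membership is used)
def pcSafeChars : PySem.Set Char :=
  PySem.Set.ofList ("ABCDEFGHIJKLMNOPQRSTUVWXYZabcdefghijklmnopqrstuvwxyz0123456789!?.,:-+%=&()' ".toList)

-- A's while loop, pos/find based; fuel only makes the loop total (pos strictly increases,
-- so s.length + 1 steps always suffice)
def pcLoopA (s : List Char) : Nat → Nat → List (List Char) → List (List Char)
  | 0, _, acc => acc
  | fuel+1, pos, acc =>
    if h : pos < s.length then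
      let ch := s[pos]
      if ch = '<' then
        let e := PySem.Chars.findFrom s ['>'] (pos : Int)
        if e = -1 then pcLoopA s fuel (pos+1) acc
        else
          let tag := PySem.Chars.slice s (some ((pos : Int) + 1)) (some e)
          if PySem.Chars.startswith tag "WAIT".toList then
            let innerStart : Int := e + 1
            let close := PySem.Chars.findFrom s "</WAIT>".toList innerStart
            if close ≠ -1 then
              let hexVal := PySem.Chars.strip (PySem.Chars.slice s (some innerStart) (some close))
              pcLoopA s fuel (close + 7).toNat (acc ++ ["{delay ".toList ++ hexVal ++ "}".toList])
            else pcLoopA s fuel (e + 1).toNat acc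
          else
            match PySem.Dict.get? pcTagMap tag with
            | some v => pcLoopA s fuel (e + 1).toNat (acc ++ [v])
            | none   => pcLoopA s fuel (e + 1).toNat acc
      else if ch = '\\' then pcLoopA s fuel (pos+1) (acc ++ ["{line break}".toList])
      else if PySem.Set.contains pcSafeChars ch then pcLoopA s fuel (pos+1) (acc ++ [[ch]])
      else pcLoopA s fuel (pos+1) acc
    else acc

def pc_str_to_ct_ascii_py (s : String) : String :=
  String.ofList (PySem.Chars.join [] (pcLoopA s.toList (s.toList.length + 1) 0 []))

-- ===== PORT B =====
-- hand port of str.partition(sep), exact for these two literal separators: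
-- first piece before the first occurrence, a found flag (Python: the sep itself), the rest
def pcPartGt : List Char → (List Char × Bool × List Char)
  | [] => ([], false, [])
  | c :: t =>
    if c = '>' then ([], true, t)
    else
      let p := pcPartGt t
      (c :: p.1, p.2.1, p.2.2)

def pcPartClose : List Char → (List Char × Bool × List Char)
  | [] => ([], false, [])
  | c :: t =>
    if PySem.Chars.startswith (c :: t) "</WAIT>".toList then ([], true, (c :: t).drop 7)
    else
      let p := pcPartClose t
      (c :: p.1, p.2.1, p.2.2)

-- _match_token: the four alternatives in order
def pcMatchTok (cs : List Char) : Option (List Char × List Char) :=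
  -- alternative 1: <WAIT...>HH</WAIT>
  (if PySem.Chars.startswith cs "<WAIT".toList then
     let p := pcPartGt (cs.drop 5)
     if p.2.1 then
       let q := pcPartClose p.2.2
       if q.2.1 then some ("{delay ".toList ++ PySem.Chars.strip q.1 ++ "}".toList, q.2.2)
       else pcMatchTok₂ cs
     else pcMatchTok₂ cs
   else pcMatchTok₂ cs)
where
  -- alternative 2: a generic <...> tag — translated via the map, or dropped
  pcMatchTok₂ (cs : List Char) : Option (List Char × List Char) :=
    if PySem.Chars.startswith cs "<".toList then
      let p := pcPartGt (cs.drop 1)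
      if p.2.1 then some (PySem.Dict.getD pcTagMap p.1 [], p.2.2)
      else pcMatchTok₃ cs
    else pcMatchTok₃ cs
  -- alternatives 3 and 4: backslash line break; a safe literal character
  pcMatchTok₃ (cs : List Char) : Option (List Char × List Char) :=
    if PySem.Chars.startswith cs "\\".toList then some ("{line break}".toList, cs.drop 1)
    else
      match cs with
      | [] => none
      | c :: t => if PySem.Set.contains pcSafeChars c then some ([c], t) else none

-- B's while loop over the remaining suffix (fuel only makes it total: every token consumes ≥ 1 char)
def pcLoopB : Nat → List Char → List (List Char) → List (List Char)
  | 0, _, acc => acc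
  | fuel+1, cs, acc =>
    match cs with
    | [] => acc
    | _ :: t =>
      match pcMatchTok cs with
      | none => pcLoopB fuel t acc
      | some (emit, rest) => pcLoopB fuel rest (acc ++ [emit])

def pc_str_to_ct_ascii_py_alt (s : String) : String :=
  String.ofList (PySem.Chars.join [] (pcLoopB (s.toList.length + 1) s.toList []))

-- ===== PRECONDITION & SPEC =====
def Spec_pc_str_to_ct_ascii_py (s : String) (out : String) : Prop := out = pc_str_to_ct_ascii_py_alt s
instance (s : String) (out : String) : Decidable (Spec_pc_str_to_ct_ascii_py s out) := by unfold Spec_pc_str_to_ct_ascii_py; infer_instance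

-- ===== CLAIM (what is proved, stated in full; the proofs are below) =====
def Claim_equal_pc_str_to_ct_ascii_py : Prop := ∀ (s : String), Dom_pc_str_to_ct_ascii_py s → Spec_pc_str_to_ct_ascii_py s (pc_str_to_ct_ascii_py s)

-- ===== LEMMAS AND PROOFS =====

lemma pc_singleton_prefix (a : Char) (m : List Char) : [a] <+: m ↔ m.head? = some a := by
  cases m <;> simp [List.prefix_cons_iff, eq_comm]

lemma pc_join_nil_flatten (parts : List (List Char)) : PySem.Chars.join [] parts = parts.flatten := by
  simp only [PySem.Chars.join, List.intercalate]
  induction parts with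
  | nil => simp
  | cons h t ih => cases t <;> simp_all [List.intersperse]

lemma pc_partGt_not_mem (l : List Char) (h : '>' ∉ l) : pcPartGt l = (l, false, []) := by
  induction l with
  | nil => rfl
  | cons c t ih =>
    simp only [List.mem_cons, not_or] at h
    simp [pcPartGt, Ne.symm h.1, ih h.2]

lemma pc_partGt_first (l : List Char) (k : Nat) (h1 : l[k]? = some '>')
    (h2 : ∀ i < k, l[i]? ≠ some '>') :
    pcPartGt l = (l.take k, true, l.drop (k+1)) := by
  induction l generalizing k with
  | nil => simp at h1
  | cons c t ih =>
    by_cases hc : c = '>'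
    · have hk : k = 0 := by
        by_contra hk0
        exact h2 0 (Nat.pos_of_ne_zero hk0) (by simp [hc])
      subst hk hc
      simp [pcPartGt]
    · obtain ⟨k', rfl⟩ : ∃ k', k = k' + 1 := by
        cases k with
        | zero => simp_all
        | succ k' => exact ⟨k', rfl⟩
      have := ih k' (by simpa using h1) (fun i hi => by
        have := h2 (i+1) (by omega); simpa using this)
      simp [pcPartGt, hc, this]

lemma pc_partClose_none (l : List Char) (h : ∀ i, ¬ "</WAIT>".toList <+: l.drop i) :
    pcPartClose l = (l, false, []) := by
  induction l with
  | nil => rfl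
  | cons c t ih =>
    have h0 : PySem.Chars.startswith (c :: t) "</WAIT>".toList = false := by
      rw [Bool.eq_false_iff]
      intro hs
      exact h 0 (by simpa using (PySem.Chars.startswith_iff _ _).1 hs)
    rw [pcPartClose, h0]
    simp [ih (fun i => by simpa using h (i+1))]

lemma pc_partClose_first (l : List Char) (k : Nat) (h1 : "</WAIT>".toList <+: l.drop k)
    (h2 : ∀ i < k, ¬ "</WAIT>".toList <+: l.drop i) :
    pcPartClose l = (l.take k, true, l.drop (k+7)) := by
  induction l generalizing k with
  | nil =>
    rw [List.drop_nil] at h1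
    have := List.prefix_nil.1 h1
    simp at this
  | cons c t ih =>
    cases k with
    | zero =>
      have h0 : PySem.Chars.startswith (c :: t) "</WAIT>".toList = true :=
        (PySem.Chars.startswith_iff _ _).2 (by simpa using h1)
      rw [pcPartClose, h0]
      simp
    | succ k' =>
      have h0 : PySem.Chars.startswith (c :: t) "</WAIT>".toList = false := by
        rw [Bool.eq_false_iff]
        intro hs
        exact h2 0 (by omega) (by simpa using (PySem.Chars.startswith_iff _ _).1 hs)
      rw [pcPartClose, h0]
      have := ih k' (by simpa using h1) (fun i hi => by
        have := h2 (i+1) (by omega); simpa using this)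
      simp [this]

-- no key of the tag map starts with "WAIT"
lemma pc_tagMap_wait (tag : List Char) (h : "WAIT".toList <+: tag) :
    PySem.Dict.get? pcTagMap tag = none := by
  obtain ⟨t, rfl⟩ := h
  have hm : pcTagMap = PySem.Dict.mk
    [(['N','A','M','E','_','C','R','O'], "{crono}".toList),
     (['N','A','M','E','_','M','A','R'], "{marle}".toList),
     (['N','A','M','E','_','L','U','C'], "{lucca}".toList),
     (['N','A','M','E','_','R','O','B'], "{robo}".toList),
     (['N','A','M','E','_','F','R','O'], "{frog}".toList),
     (['N','A','M','E','_','A','Y','L'], "{ayla}".toList),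
     (['N','A','M','E','_','M','A','G'], "{magus}".toList),
     (['N','I','C','K','_','C','R','O'], "{crononick}".toList),
     (['P','A','G','E'], "{page break}".toList),
     (['A','U','T','O','_','P','A','G','E'], "{page break}".toList)] := by decide
  have hw : ("WAIT".toList : List Char) = ['W','A','I','T'] := by decide
  rw [hm, hw]
  simp [PySem.Dict.get?_mk_cons]
  rfl

lemma pc_sw_cons_ne (c d : Char) (t ps : List Char) (hne : d ≠ c) :
    PySem.Chars.startswith (c :: t) (d :: ps) = false := by
  rw [Bool.eq_false_iff]
  intro h
  exact hne (List.cons_prefix_cons.1 ((PySem.Chars.startswith_iff _ _).1 h)).1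

lemma pc_find_gt (cs : List Char) (h : PySem.Chars.find cs ['>'] ≠ -1) :
    cs[(PySem.Chars.find cs ['>']).toNat]? = some '>' ∧
      ∀ i < (PySem.Chars.find cs ['>']).toNat, cs[i]? ≠ some '>' := by
  have h0 : 0 ≤ PySem.Chars.find cs ['>'] := by
    have := PySem.Chars.neg_one_le_find cs ['>']
    omega
  obtain ⟨hp, hmin⟩ := PySem.Chars.find_spec h0
  refine ⟨?_, fun i hi hq => hmin i hi ?_⟩
  · have := (pc_singleton_prefix '>' _).1 hp
    rwa [List.head?_drop] at this
  · rw [pc_singleton_prefix, List.head?_drop]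
    exact hq

set_option maxRecDepth 4096 in
lemma pc_lt_not_safe : '<' ∉ pcSafeChars := by decide

lemma pc_matchTok3_lt (t : List Char) : pcMatchTok.pcMatchTok₃ ('<' :: t) = none := by
  rw [pcMatchTok.pcMatchTok₃]
  rw [show ("\\".toList : List Char) = ['\\'] from by decide]
  rw [pc_sw_cons_ne _ _ _ _ (by decide)]
  simp [pc_lt_not_safe]

-- alt1 and alt2 both fail when the head is '<' but there is no '>' at all
lemma pc_matchTok_no_gt (t : List Char) (hno : '>' ∉ '<' :: t) :
    pcMatchTok ('<' :: t) = none := by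
  have h2 : pcMatchTok.pcMatchTok₂ ('<' :: t) = none := by
    rw [pcMatchTok.pcMatchTok₂]
    rw [show ("<".toList : List Char) = ['<'] from by decide]
    rw [(PySem.Chars.startswith_iff _ _).2 (by exact List.cons_prefix_cons.2 ⟨rfl, List.nil_prefix⟩)]
    have := pc_partGt_not_mem t (by
      intro hmem; exact hno (List.mem_cons_of_mem _ hmem))
    simp [this, pc_matchTok3_lt]
  rw [pcMatchTok]
  by_cases h5 : PySem.Chars.startswith ('<' :: t) "<WAIT".toList
  · rw [if_pos h5]
    have := pc_partGt_not_mem (t.drop 4) (by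
      intro hmem; exact hno (List.mem_cons_of_mem _ (List.mem_of_mem_drop hmem)))
    simp [this, h2]
  · rw [if_neg h5]
    exact h2

-- a tag whose text does not start with WAIT: alternative 2 fires
lemma pc_matchTok_tag (cs' : List Char) (k : Nat)
    (h1 : cs'[k]? = some '>') (h2 : ∀ i < k, cs'[i]? ≠ some '>')
    (hw : PySem.Chars.startswith (cs'.take k) "WAIT".toList = false) :
    pcMatchTok ('<' :: cs') = some (PySem.Dict.getD pcTagMap (cs'.take k) [], cs'.drop (k+1)) := by
  have hg : PySem.Chars.startswith ('<' :: cs') "<WAIT".toList = false := by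
    rw [Bool.eq_false_iff]
    intro h
    have hpre : "WAIT".toList <+: cs' := by
      have := (PySem.Chars.startswith_iff _ _).1 h
      rw [show ("<WAIT".toList : List Char) = '<' :: "WAIT".toList from by decide] at this
      exact (List.cons_prefix_cons.1 this).2
    have h4 : 4 ≤ k := by
      by_contra hlt
      obtain ⟨t, rfl⟩ := hpre
      rw [List.getElem?_append_left (by simp; omega)] at h1
      interval_cases k <;> simp_all
    have : PySem.Chars.startswith (cs'.take k) "WAIT".toList = true :=
      (PySem.Chars.startswith_iff _ _).2
        (List.prefix_take_iff.2 ⟨hpre, by rw [show ("WAIT".toList : List Char).length = 4 from by decide]; omega⟩)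
    rw [hw] at this
    exact Bool.false_ne_true this
  have h2' : pcMatchTok.pcMatchTok₂ ('<' :: cs') =
      some (PySem.Dict.getD pcTagMap (cs'.take k) [], cs'.drop (k+1)) := by
    rw [pcMatchTok.pcMatchTok₂]
    rw [show ("<".toList : List Char) = ['<'] from by decide]
    rw [(PySem.Chars.startswith_iff _ _).2 (by exact List.cons_prefix_cons.2 ⟨rfl, List.nil_prefix⟩)]
    simp [pc_partGt_first cs' k h1 h2]
  rw [pcMatchTok, hg]
  simp [h2']

-- a <WAIT...> tag with a closing </WAIT>: alternative 1 fires
lemma pc_matchTok_wait_close (cs' : List Char) (k m : Nat)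
    (h1 : cs'[k]? = some '>') (h2 : ∀ i < k, cs'[i]? ≠ some '>')
    (hw : PySem.Chars.startswith (cs'.take k) "WAIT".toList = true)
    (hm1 : "</WAIT>".toList <+: (cs'.drop (k+1)).drop m)
    (hm2 : ∀ i < m, ¬ "</WAIT>".toList <+: (cs'.drop (k+1)).drop i) :
    pcMatchTok ('<' :: cs') =
      some ("{delay ".toList ++ PySem.Chars.strip ((cs'.drop (k+1)).take m) ++ "}".toList,
        (cs'.drop (k+1)).drop (m+7)) := by
  have hpre : "WAIT".toList <+: cs' :=
    ((PySem.Chars.startswith_iff _ _).1 hw).trans (List.take_prefix k cs')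
  have h4 : 4 ≤ k := by
    have hlen := ((PySem.Chars.startswith_iff _ _).1 hw).length_le
    rw [show ("WAIT".toList : List Char).length = 4 from by decide] at hlen
    obtain ⟨hk, -⟩ := List.getElem?_eq_some_iff.1 h1
    simp [List.length_take] at hlen
    omega
  have hg : PySem.Chars.startswith ('<' :: cs') "<WAIT".toList = true := by
    rw [PySem.Chars.startswith_iff,
      show ("<WAIT".toList : List Char) = '<' :: "WAIT".toList from by decide]
    exact List.cons_prefix_cons.2 ⟨rfl, hpre⟩
  have hpart : pcPartGt (('<' :: cs').drop 5) =
      (((cs'.drop 4).take (k-4)), true, cs'.drop (k+1)) := by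
    have hd5 : ('<' :: cs').drop 5 = cs'.drop 4 := by simp
    have e1 : (cs'.drop 4)[k-4]? = some '>' := by
      rw [List.getElem?_drop]
      rw [show 4 + (k - 4) = k from by omega]
      exact h1
    have e2 : ∀ i < k - 4, (cs'.drop 4)[i]? ≠ some '>' := by
      intro i hi
      rw [List.getElem?_drop]
      exact h2 (4+i) (by omega)
    rw [hd5, pc_partGt_first _ _ e1 e2, List.drop_drop]
    rw [show 4 + (k - 4 + 1) = k + 1 from by omega]
  rw [pcMatchTok, hg]
  simp only [if_true]
  rw [hpart]
  simp only [pc_partClose_first _ m hm1 hm2]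
  rfl

-- a <WAIT...> tag without a closing </WAIT>: it falls through to alternative 2, which drops it
lemma pc_matchTok_wait_noclose (cs' : List Char) (k : Nat)
    (h1 : cs'[k]? = some '>') (h2 : ∀ i < k, cs'[i]? ≠ some '>')
    (hw : PySem.Chars.startswith (cs'.take k) "WAIT".toList = true)
    (hm : ∀ i, ¬ "</WAIT>".toList <+: (cs'.drop (k+1)).drop i) :
    pcMatchTok ('<' :: cs') = some ([], cs'.drop (k+1)) := by
  have hpre : "WAIT".toList <+: cs' :=
    ((PySem.Chars.startswith_iff _ _).1 hw).trans (List.take_prefix k cs')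
  have h4 : 4 ≤ k := by
    have hlen := ((PySem.Chars.startswith_iff _ _).1 hw).length_le
    rw [show ("WAIT".toList : List Char).length = 4 from by decide] at hlen
    obtain ⟨hk, -⟩ := List.getElem?_eq_some_iff.1 h1
    simp [List.length_take] at hlen
    omega
  have hg : PySem.Chars.startswith ('<' :: cs') "<WAIT".toList = true := by
    rw [PySem.Chars.startswith_iff,
      show ("<WAIT".toList : List Char) = '<' :: "WAIT".toList from by decide]
    exact List.cons_prefix_cons.2 ⟨rfl, hpre⟩
  have hpart : pcPartGt (('<' :: cs').drop 5) =
      (((cs'.drop 4).take (k-4)), true, cs'.drop (k+1)) := by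
    have hd5 : ('<' :: cs').drop 5 = cs'.drop 4 := by simp
    have e1 : (cs'.drop 4)[k-4]? = some '>' := by
      rw [List.getElem?_drop]
      rw [show 4 + (k - 4) = k from by omega]
      exact h1
    have e2 : ∀ i < k - 4, (cs'.drop 4)[i]? ≠ some '>' := by
      intro i hi
      rw [List.getElem?_drop]
      exact h2 (4+i) (by omega)
    rw [hd5, pc_partGt_first _ _ e1 e2, List.drop_drop]
    rw [show 4 + (k - 4 + 1) = k + 1 from by omega]
  have hgetD : PySem.Dict.getD pcTagMap (cs'.take k) [] = [] := by
    rw [PySem.Dict.getD_eq_get?_getD,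
      pc_tagMap_wait _ (List.prefix_take_iff.2 ⟨hpre, by
        rw [show ("WAIT".toList : List Char).length = 4 from by decide]; omega⟩)]
    rfl
  have h2' : pcMatchTok.pcMatchTok₂ ('<' :: cs') = some ([], cs'.drop (k+1)) := by
    rw [pcMatchTok.pcMatchTok₂]
    rw [show ("<".toList : List Char) = ['<'] from by decide]
    rw [(PySem.Chars.startswith_iff _ _).2 (by exact List.cons_prefix_cons.2 ⟨rfl, List.nil_prefix⟩)]
    simp [pc_partGt_first cs' k h1 h2, hgetD]
  rw [pcMatchTok, hg]
  simp only [if_true]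
  rw [hpart]
  simp only [pc_partClose_none _ hm]
  simpa using h2'

lemma pc_matchTok_backslash (t : List Char) :
    pcMatchTok ('\\' :: t) = some ("{line break}".toList, t) := by
  rw [pcMatchTok]
  rw [show ("<WAIT".toList : List Char) = '<' :: "WAIT".toList from by decide]
  rw [pc_sw_cons_ne _ _ _ _ (by decide)]
  simp only [if_false, Bool.false_eq_true]
  rw [pcMatchTok.pcMatchTok₂]
  rw [show ("<".toList : List Char) = ['<'] from by decide]
  rw [pc_sw_cons_ne _ _ _ _ (by decide)]
  simp only [if_false, Bool.false_eq_true]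
  rw [pcMatchTok.pcMatchTok₃]
  rw [show ("\\".toList : List Char) = ['\\'] from by decide]
  rw [(PySem.Chars.startswith_iff _ _).2 (by exact List.cons_prefix_cons.2 ⟨rfl, List.nil_prefix⟩)]
  simp

lemma pc_matchTok_char (c : Char) (t : List Char) (hc : c ≠ '<') (hb : c ≠ '\\') :
    pcMatchTok (c :: t) =
      (if PySem.Set.contains pcSafeChars c then some ([c], t) else none) := by
  rw [pcMatchTok]
  rw [show ("<WAIT".toList : List Char) = '<' :: "WAIT".toList from by decide]
  rw [pc_sw_cons_ne _ _ _ _ (Ne.symm hc)]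
  simp only [if_false, Bool.false_eq_true]
  rw [pcMatchTok.pcMatchTok₂]
  rw [show ("<".toList : List Char) = ['<'] from by decide]
  rw [pc_sw_cons_ne _ _ _ _ (Ne.symm hc)]
  simp only [if_false, Bool.false_eq_true]
  rw [pcMatchTok.pcMatchTok₃]
  rw [show ("\\".toList : List Char) = ['\\'] from by decide]
  rw [pc_sw_cons_ne _ _ _ _ (Ne.symm hb)]
  simp

lemma pcLoopB_step_none (fuel : Nat) (c : Char) (t : List Char) (acc : List (List Char))
    (h : pcMatchTok (c :: t) = none) :
    pcLoopB (fuel+1) (c :: t) acc = pcLoopB fuel t acc := by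
  simp only [pcLoopB, h]

lemma pcLoopB_step_some (fuel : Nat) (c : Char) (t : List Char) (acc : List (List Char))
    (emit rest : List Char) (h : pcMatchTok (c :: t) = some (emit, rest)) :
    pcLoopB (fuel+1) (c :: t) acc = pcLoopB fuel rest (acc ++ [emit]) := by
  simp only [pcLoopB, h]

-- the main step-by-step equivalence of the two loops
lemma pc_loop_eq (fuel : Nat) (l : List Char) (pos : Nat) (acc1 acc2 : List (List Char))
    (hpos : pos ≤ l.length) (hacc : acc1.flatten = acc2.flatten) :
    (pcLoopA l fuel pos acc1).flatten = (pcLoopB fuel (l.drop pos) acc2).flatten := by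
  induction fuel generalizing pos acc1 acc2 with
  | zero =>
    rw [pcLoopA, pcLoopB]
    exact hacc
  | succ fuel ih =>
    rcases Nat.lt_or_ge pos l.length with hlt | hge
    case inr =>
      have hpe : pos = l.length := le_antisymm hpos hge
      rw [pcLoopA, dif_neg (by omega), hpe, List.drop_length, pcLoopB]
      exact hacc
    case inl =>
      have hdrop : l.drop pos = l[pos] :: l.drop (pos+1) := List.drop_eq_getElem_cons hlt
      by_cases hc : l[pos] = '<'
      · have hff := PySem.Chars.findFrom_natCast l ['>'] pos (le_of_lt hlt)
        by_cases hj : PySem.Chars.find (l.drop pos) ['>'] = -1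
        · -- no '>' at or after pos: both sides drop one character
          have he : PySem.Chars.findFrom l ['>'] (pos:Int) = -1 := by rw [hff, if_pos hj]
          have hA : pcLoopA l (fuel+1) pos acc1 = pcLoopA l fuel (pos+1) acc1 := by
            rw [pcLoopA, dif_pos hlt]
            simp [hc, he]
          have hmem : '>' ∉ l.drop pos := fun hin =>
            ((PySem.Chars.find_eq_neg_one_iff _ _).1 hj) ((List.singleton_infix_iff _ _).2 hin)
          have hB : pcLoopB (fuel+1) (l.drop pos) acc2 = pcLoopB fuel (l.drop (pos+1)) acc2 := by
            rw [hdrop, pcLoopB_step_none]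
            rw [hdrop, hc] at hmem
            rw [hc]
            exact pc_matchTok_no_gt _ hmem
          rw [hA, hB]
          exact ih (pos+1) acc1 acc2 hlt hacc
        · -- the first '>' at or after pos sits at cs'[k], where cs' = l.drop (pos+1)
          obtain ⟨hj1, hj2⟩ := pc_find_gt (l.drop pos) hj
          have hj0 : 0 ≤ PySem.Chars.find (l.drop pos) ['>'] := by
            have := PySem.Chars.neg_one_le_find (l.drop pos) ['>']
            omega
          obtain ⟨k, hk⟩ : ∃ k, (PySem.Chars.find (l.drop pos) ['>']).toNat = k + 1 := by
            refine Nat.exists_eq_succ_of_ne_zero ?_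
            intro h0
            rw [h0, hdrop] at hj1
            simp [hc] at hj1
          rw [hk] at hj1 hj2
          rw [List.getElem?_drop] at hj1
          have h1 : (l.drop (pos+1))[k]? = some '>' := by
            rw [List.getElem?_drop, show pos + 1 + k = pos + (k+1) from by omega]
            exact hj1
          have h2 : ∀ i < k, (l.drop (pos+1))[i]? ≠ some '>' := by
            intro i hi
            have := hj2 (i+1) (by omega)
            rw [List.getElem?_drop] at this
            rw [List.getElem?_drop, show pos + 1 + i = pos + (i+1) from by omega]
            exact this
          obtain ⟨hklt, -⟩ := List.getElem?_eq_some_iff.1 h1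
          rw [List.length_drop] at hklt
          rw [← List.getElem?_drop] at hj1
          have he : PySem.Chars.findFrom l ['>'] (pos:Int) = ((pos+k+1 : Nat) : Int) := by
            rw [hff, if_neg hj]
            rw [show PySem.Chars.find (l.drop pos) ['>'] = ((k+1 : Nat) : Int) from by omega]
            push_cast
            ring
          have hne : ((pos+k+1 : Nat) : Int) ≠ -1 := by omega
          have htag : PySem.Chars.slice l (some ((pos : Int) + 1)) (some ((pos+k+1 : Nat) : Int)) =
              (l.drop (pos+1)).take k := by
            rw [show ((pos : Int) + 1) = ((pos+1 : Nat) : Int) from by push_cast; ring,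
              PySem.Chars.slice_eq_listSlice, PySem.List.slice_natCast]
            congr 1
            omega
          have hB0 : pcLoopB (fuel+1) (l.drop pos) acc2 = pcLoopB (fuel+1) ('<' :: l.drop (pos+1)) acc2 := by
            rw [hdrop, hc]
          by_cases hw : PySem.Chars.startswith ((l.drop (pos+1)).take k) "WAIT".toList
          · -- a <WAIT...> tag
            have hlen2 : pos + k + 2 ≤ l.length := by omega
            have hcast2 : ((pos+k+1 : Nat) : Int) + 1 = ((pos+k+2 : Nat) : Int) := by push_cast; ring
            have hffc := PySem.Chars.findFrom_natCast l "</WAIT>".toList (pos+k+2) hlen2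
            have hAT : l.drop (pos+k+2) = (l.drop (pos+1)).drop (k+1) := by
              rw [List.drop_drop]
              congr 1
              omega
            by_cases hm : PySem.Chars.find (l.drop (pos+k+2)) "</WAIT>".toList = -1
            · -- no closing </WAIT>: the tag falls through and is dropped
              have hcl : PySem.Chars.findFrom l "</WAIT>".toList (((pos+k+1 : Nat) : Int) + 1) = -1 := by
                rw [hcast2, hffc, if_pos hm]
              have hA : pcLoopA l (fuel+1) pos acc1 = pcLoopA l fuel (pos+k+2) acc1 := by
                rw [pcLoopA, dif_pos hlt]
                simp only [hc, if_pos, he, htag, hw, hcl, ne_eq, not_true_eq_false, if_false]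
                congr 1
              have hnocl : ∀ i, ¬ "</WAIT>".toList <+: ((l.drop (pos+1)).drop (k+1)).drop i := by
                intro i hp
                refine ((PySem.Chars.find_eq_neg_one_iff _ _).1 hm) ?_
                rw [hAT]
                exact hp.isInfix.trans (List.drop_suffix _ _).isInfix
              have hB : pcLoopB (fuel+1) (l.drop pos) acc2 =
                  pcLoopB fuel (l.drop (pos+k+2)) (acc2 ++ [[]]) := by
                rw [hB0, pcLoopB_step_some fuel '<' _ acc2 [] ((l.drop (pos+1)).drop (k+1))
                  (pc_matchTok_wait_noclose _ k h1 h2 hw hnocl), hAT]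
              rw [hA, hB]
              exact ih (pos+k+2) acc1 (acc2 ++ [[]]) (by omega) (by simpa using hacc)
            · -- closing </WAIT> found at afterTag[m..]
              obtain ⟨hm1', hm2'⟩ := PySem.Chars.find_spec (s := l.drop (pos+k+2))
                (sub := "</WAIT>".toList) (by
                  have := PySem.Chars.neg_one_le_find (l.drop (pos+k+2)) "</WAIT>".toList
                  omega)
              have hge0 : 0 ≤ PySem.Chars.find (l.drop (pos+k+2)) "</WAIT>".toList := by
                have := PySem.Chars.neg_one_le_find (l.drop (pos+k+2)) "</WAIT>".toList
                omega
              set m := (PySem.Chars.find (l.drop (pos+k+2)) "</WAIT>".toList).toNat with hmdef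
              have hmi : PySem.Chars.find (l.drop (pos+k+2)) "</WAIT>".toList = ((m : Nat) : Int) := by
                omega
              have hcl : PySem.Chars.findFrom l "</WAIT>".toList (((pos+k+1 : Nat) : Int) + 1) =
                  ((pos+k+2+m : Nat) : Int) := by
                rw [hcast2, hffc, if_neg hm, hmi]
                push_cast
                ring
              have hlm : pos + k + 2 + m + 7 ≤ l.length := by
                have h7 := hm1'.length_le
                rw [List.length_drop, List.length_drop] at h7
                rw [show ("</WAIT>".toList : List Char).length = 7 from by decide] at h7
                omega
              have hhex : PySem.Chars.slice l (some (((pos+k+1 : Nat) : Int) + 1))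
                  (some ((pos+k+2+m : Nat) : Int)) = ((l.drop (pos+1)).drop (k+1)).take m := by
                rw [hcast2, PySem.Chars.slice_eq_listSlice, PySem.List.slice_natCast, ← hAT]
                congr 1
                omega
              have hA : pcLoopA l (fuel+1) pos acc1 = pcLoopA l fuel (pos+k+2+m+7)
                  (acc1 ++ ["{delay ".toList ++
                    PySem.Chars.strip (((l.drop (pos+1)).drop (k+1)).take m) ++ "}".toList]) := by
                rw [pcLoopA, dif_pos hlt]
                simp only [hc, if_pos, he, htag, hw, hcl, ne_eq, hhex]
                rw [if_pos (show ¬ (((pos+k+2+m : Nat) : Int) = -1) from by omega)]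
                congr 1
              have hm1 : "</WAIT>".toList <+: ((l.drop (pos+1)).drop (k+1)).drop m := by
                rw [← hAT]
                exact hm1'
              have hm2 : ∀ i < m, ¬ "</WAIT>".toList <+: ((l.drop (pos+1)).drop (k+1)).drop i := by
                intro i hi
                rw [← hAT]
                exact hm2' i hi
              have hB : pcLoopB (fuel+1) (l.drop pos) acc2 =
                  pcLoopB fuel (l.drop (pos+k+2+m+7))
                    (acc2 ++ ["{delay ".toList ++
                      PySem.Chars.strip (((l.drop (pos+1)).drop (k+1)).take m) ++ "}".toList]) := by
                rw [hB0, pcLoopB_step_some fuel '<' _ acc2 _ (((l.drop (pos+1)).drop (k+1)).drop (m+7))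
                  (pc_matchTok_wait_close _ k m h1 h2 hw hm1 hm2)]
                congr 1
                rw [List.drop_drop, List.drop_drop]
                congr 1
                omega
              rw [hA, hB]
              exact ih (pos+k+2+m+7) _ _ (by omega) (by simp [hacc])
          · -- an ordinary tag: mapped if known, dropped otherwise
            have hA : pcLoopA l (fuel+1) pos acc1 =
                (match PySem.Dict.get? pcTagMap ((l.drop (pos+1)).take k) with
                 | some v => pcLoopA l fuel (pos+k+2) (acc1 ++ [v])
                 | none   => pcLoopA l fuel (pos+k+2) acc1) := by
              rw [pcLoopA, dif_pos hlt]
              simp only [hc, if_pos, he, hne, htag, hw, Bool.false_eq_true, if_false]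
              rw [show (((pos+k+1 : Nat) : Int) + 1).toNat = pos+k+2 from by omega]
            have hB : pcLoopB (fuel+1) (l.drop pos) acc2 =
                pcLoopB fuel (l.drop (pos+k+2))
                  (acc2 ++ [PySem.Dict.getD pcTagMap ((l.drop (pos+1)).take k) []]) := by
              rw [hB0, pcLoopB_step_some fuel '<' _ acc2 _ ((l.drop (pos+1)).drop (k+1))
                (pc_matchTok_tag _ k h1 h2 (Bool.eq_false_iff.2 hw))]
              congr 1
              rw [List.drop_drop]
              congr 1
              omega
            rw [hA, hB]
            cases hget : PySem.Dict.get? pcTagMap ((l.drop (pos+1)).take k) with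
            | some v =>
              rw [PySem.Dict.getD_eq_get?_getD, hget]
              exact ih (pos+k+2) _ _ (by omega) (by simp [hacc])
            | none =>
              rw [PySem.Dict.getD_eq_get?_getD, hget]
              exact ih (pos+k+2) _ _ (by omega) (by simpa using hacc)
      · by_cases hb : l[pos] = '\\'
        · -- a backslash line break
          have hA : pcLoopA l (fuel+1) pos acc1 =
              pcLoopA l fuel (pos+1) (acc1 ++ ["{line break}".toList]) := by
            rw [pcLoopA, dif_pos hlt]
            simp [hb]
          have hB : pcLoopB (fuel+1) (l.drop pos) acc2 =
              pcLoopB fuel (l.drop (pos+1)) (acc2 ++ ["{line break}".toList]) := by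
            rw [hdrop, hb, pcLoopB_step_some fuel _ _ acc2 _ _ (pc_matchTok_backslash _)]
          rw [hA, hB]
          exact ih (pos+1) _ _ hlt (by simp [hacc])
        · -- any other character: kept if safe, dropped otherwise
          have hmt := pc_matchTok_char (l[pos]) (l.drop (pos+1)) hc hb
          by_cases hs : PySem.Set.contains pcSafeChars (l[pos])
          · have hA : pcLoopA l (fuel+1) pos acc1 =
                pcLoopA l fuel (pos+1) (acc1 ++ [[l[pos]]]) := by
              rw [pcLoopA, dif_pos hlt]
              simp [hc, hb]
              intro hmem
              exact absurd (by simpa using hs) hmem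
            have hB : pcLoopB (fuel+1) (l.drop pos) acc2 =
                pcLoopB fuel (l.drop (pos+1)) (acc2 ++ [[l[pos]]]) := by
              simp only [hs, if_true] at hmt
              rw [hdrop, pcLoopB_step_some fuel _ _ acc2 _ _ hmt]
            rw [hA, hB]
            exact ih (pos+1) _ _ hlt (by simp [hacc])
          · have hA : pcLoopA l (fuel+1) pos acc1 = pcLoopA l fuel (pos+1) acc1 := by
              rw [pcLoopA, dif_pos hlt]
              simp [hc, hb]
              intro hmem
              exact absurd hmem (by simpa using hs)
            have hB : pcLoopB (fuel+1) (l.drop pos) acc2 =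
                pcLoopB fuel (l.drop (pos+1)) acc2 := by
              simp only [Bool.eq_false_iff.2 (by exact hs)] at hmt
              rw [hdrop, pcLoopB_step_none fuel _ _ acc2 hmt]
            rw [hA, hB]
            exact ih (pos+1) _ _ hlt hacc

-- ===== VERDICT (by name: the statement is the Claim_ definition above) =====
theorem pc_str_to_ct_ascii_py_spec : Claim_equal_pc_str_to_ct_ascii_py := by
  intro s _
  unfold Spec_pc_str_to_ct_ascii_py pc_str_to_ct_ascii_py pc_str_to_ct_ascii_py_alt
  rw [pc_join_nil_flatten, pc_join_nil_flatten,
    pc_loop_eq (s.toList.length + 1) s.toList 0 [] [] (by simp) rfl]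
  simp
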